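-- pv_equiv track=rewrite | github.com/akblakney/predict | ts_util.py | get_seasonal_components
-- ===== SOURCE A (Python) =====
-- def get_seasonal_components(data, period=7):
--     n = len(data)
--     days = []
--     for i in range(period):
--         j = i
--         l = []
--         while j < n:
--             l.append(data[j])
--             j += period
--         days.append(l)
--     return days
-- ===== SOURCE B (Python) =====
-- def get_seasonal_components(data, period=7):
--     if period <= 0:
--         return []
--     days = [[] for _ in range(period)]
--     for idx, x in enumerate(data):
--         days[idx % period].append(x)
--     return days
-- ===== Notes on version B (the rewrite author's own statement) =====
-- stated objective: alternative
-- what changed: Replaces period separate strided scans (one scan per residue class, inner while loop stepping by period) with a single enumerate pass that distributes each element into bucket idx % period of a pre-created list of buckets.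
import Mathlib
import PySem

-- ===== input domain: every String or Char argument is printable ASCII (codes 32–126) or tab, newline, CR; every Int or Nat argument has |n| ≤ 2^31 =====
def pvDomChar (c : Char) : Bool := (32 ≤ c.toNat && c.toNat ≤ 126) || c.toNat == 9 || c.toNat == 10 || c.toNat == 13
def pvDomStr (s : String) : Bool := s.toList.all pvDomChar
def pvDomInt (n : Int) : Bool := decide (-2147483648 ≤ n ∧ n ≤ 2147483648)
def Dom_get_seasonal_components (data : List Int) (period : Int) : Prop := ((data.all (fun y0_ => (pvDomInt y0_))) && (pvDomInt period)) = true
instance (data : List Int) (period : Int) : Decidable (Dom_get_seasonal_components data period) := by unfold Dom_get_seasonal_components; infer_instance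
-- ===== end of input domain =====

-- B replaces A's period strided scans by one distributing pass over enumerate(data); objective: alternative decomposition, same cost.

-- ===== PORT A =====
-- inner `while j < n: l.append(data[j]); j += period` loop of A; fuel bounds the
-- iteration count (A only runs it with period ≥ 1, so data.length + 1 steps suffice)
def aWhile (data : List Int) (period : Int) (j : Int) : Nat → List Int
  | 0 => []
  | fuel + 1 =>
    if j < (data.length : Int) then
      PySem.List.pyGetD data j 0 :: aWhile data period (j + period) fuel
    else []

def get_seasonal_components (data : List Int) (period : Int) : List (List Int) :=
  (PySem.List.pyRange 0 period 1).foldl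
    (fun days i => days ++ [aWhile data period i (data.length + 1)]) []

-- ===== PORT B =====
-- `days[idx % period].append(x)`: with period > 0 and idx ≥ 0 Python's idx % period
-- is the nonnegative remainder, so `.toNat` of PySem.Int.mod is the exact list index
def get_seasonal_components_alt (data : List Int) (period : Int) : List (List Int) :=
  if period ≤ 0 then []
  else
    (PySem.List.enumerate data 0).foldl
      (fun days q => days.modify (PySem.Int.mod q.1 period).toNat (· ++ [q.2]))
      (List.replicate period.toNat [])

-- ===== PRECONDITION & SPEC =====
def Spec_get_seasonal_components (data : List Int) (period : Int) (out : List (List Int)) : Prop := out = get_seasonal_components_alt data period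
instance (data : List Int) (period : Int) (out : List (List Int)) : Decidable (Spec_get_seasonal_components data period out) := by unfold Spec_get_seasonal_components; infer_instance

-- ===== CLAIM (what is proved, stated in full; the proofs are below) =====
def Claim_equal_get_seasonal_components : Prop := ∀ (data : List Int) (period : Int), Dom_get_seasonal_components data period → Spec_get_seasonal_components data period (get_seasonal_components data period)

-- ===== LEMMAS AND PROOFS =====

-- the common specification: every p-th element (p ≥ 1), starting at the head
def everyNth (l : List Int) (p : Nat) : List Int :=
  match l with
  | [] => []
  | x :: xs => x :: everyNth (xs.drop (p - 1)) p
termination_by l.length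
decreasing_by simp

theorem everyNth_nil (p : Nat) : everyNth [] p = [] := by rw [everyNth]

theorem everyNth_cons (x : Int) (xs : List Int) (p : Nat) :
    everyNth (x :: xs) p = x :: everyNth (xs.drop (p - 1)) p := by rw [everyNth]

-- the elements of l whose (enumerate) index, starting from s, is ≡ k (mod p)
def sieve (l : List Int) (s : Int) (p : Int) (k : Nat) : List Int :=
  (PySem.List.enumerate l s).filterMap
    (fun q => if (PySem.Int.mod q.1 p).toNat = k then some q.2 else none)

theorem sieve_nil (s p : Int) (k : Nat) : sieve [] s p k = [] := rfl

theorem sieve_cons (x : Int) (xs : List Int) (s p : Int) (k : Nat) :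
    sieve (x :: xs) s p k
      = (if (PySem.Int.mod s p).toNat = k then [x] else []) ++ sieve xs (s + 1) p k := by
  unfold sieve
  rw [PySem.List.enumerate_cons, List.filterMap_cons]
  by_cases h : (PySem.Int.mod s p).toNat = k
  · simp [h]
  · simp [h]

-- A's while loop computes everyNth of the tail starting at j
theorem aWhile_eq_everyNth (data : List Int) (p : Int) (hp : 0 < p) :
    ∀ (fuel : Nat) (j : Int), 0 ≤ j → (data.length : Int) ≤ j + fuel →
      aWhile data p j fuel = everyNth (data.drop j.toNat) p.toNat := by
  intro fuel
  induction fuel with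
  | zero =>
    intro j hj hlen
    have h : data.length ≤ j.toNat := by omega
    rw [List.drop_eq_nil_of_le h, everyNth_nil]
    rfl
  | succ fuel ih =>
    intro j hj hlen
    rw [aWhile]
    by_cases hjn : j < (data.length : Int)
    · rw [if_pos hjn]
      have hjl : j.toNat < data.length := by omega
      rw [List.drop_eq_getElem_cons hjl, everyNth_cons,
          PySem.List.pyGetD_eq_getElem data 0 hj hjn,
          ih (j + p) (by omega) (by push_cast at hlen ⊢; omega),
          List.drop_drop]
      have he : (j + p).toNat = j.toNat + 1 + (p.toNat - 1) := by omega
      rw [he]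
    · rw [if_neg hjn]
      have h : data.length ≤ j.toNat := by omega
      rw [List.drop_eq_nil_of_le h, everyNth_nil]

-- sieve is everyNth of the tail starting at the first index hitting residue k
theorem sieve_eq_everyNth (p : Int) (hp : 0 < p) :
    ∀ (l : List Int) (s : Int) (k : Nat), (k : Int) < p →
      sieve l s p k = everyNth (l.drop (PySem.Int.mod ((k : Int) - s) p).toNat) p.toNat := by
  have hp' : p ≠ 0 := ne_of_gt hp
  intro l
  induction l with
  | nil =>
    intro s k hk
    rw [sieve_nil, List.drop_nil, everyNth_nil]
  | cons x xs ih =>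
    intro s k hk
    rw [sieve_cons]
    simp only [PySem.Int.mod_eq_emod_of_pos hp]
    have hm0 : 0 ≤ ((k : Int) - s) % p := Int.emod_nonneg _ hp'
    have hmp : ((k : Int) - s) % p < p := Int.emod_lt_of_pos _ hp
    have hs0 : 0 ≤ s % p := Int.emod_nonneg _ hp'
    have hsp : s % p < p := Int.emod_lt_of_pos _ hp
    have hkk : (k : Int) % p = k := Int.emod_eq_of_lt (by positivity) hk
    have hnext : ((k : Int) - (s + 1)) % p = (((k : Int) - s) % p - 1) % p := by
      conv_lhs => rw [show (k : Int) - (s + 1) = ((k : Int) - s) - 1 by ring]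
      rw [Int.sub_emod ((k : Int) - s) 1 p, Int.sub_emod (((k : Int) - s) % p) 1 p,
          Int.emod_emod_of_dvd _ dvd_rfl]
    rw [ih (s + 1) k hk]
    simp only [PySem.Int.mod_eq_emod_of_pos hp]
    by_cases hC : (s % p).toNat = k
    · have hsk : s % p = (k : Int) := by omega
      have hm_eq : ((k : Int) - s) % p = 0 := by
        rw [Int.sub_emod, hkk, hsk, sub_self, Int.zero_emod]
      have h2 : ((k : Int) - (s + 1)) % p = p - 1 := by
        rw [hnext, hm_eq]
        have e1 : (p - 1) % p = p - 1 := Int.emod_eq_of_lt (by omega) (by omega)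
        have e2 : ((0 : Int) - 1) % p = (p - 1) % p := by
          rw [Int.emod_eq_emod_iff_emod_sub_eq_zero]
          have h3 : ((0 : Int) - 1) - (p - 1) = -1 * p := by ring
          rw [h3]
          simp
        rw [e2, e1]
      rw [if_pos hC, hm_eq, h2]
      simp only [Int.toNat_zero, List.drop_zero]
      rw [everyNth_cons]
      have he : (p - 1).toNat = p.toNat - 1 := by omega
      rw [he]
      rfl
    · have hm_ne : ((k : Int) - s) % p ≠ 0 := by
        intro h0
        apply hC
        have hd : p ∣ (k : Int) - s := Int.dvd_of_emod_eq_zero h0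
        have hd2 : p ∣ s - (k : Int) := by
          rw [show s - (k : Int) = -((k : Int) - s) by ring]
          exact dvd_neg.mpr hd
        have hsk : s % p = (k : Int) % p := by
          rw [Int.emod_eq_emod_iff_emod_sub_eq_zero]
          exact Int.emod_eq_zero_of_dvd hd2
        rw [hkk] at hsk
        omega
      have h2 : ((k : Int) - (s + 1)) % p = ((k : Int) - s) % p - 1 := by
        rw [hnext]
        exact Int.emod_eq_of_lt (by omega) (by omega)
      rw [if_neg hC, h2, List.nil_append]
      have hdrop : (x :: xs).drop ((((k : Int) - s) % p)).toNat
          = xs.drop (((((k : Int) - s) % p)).toNat - 1) := by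
        rw [show ((((k : Int) - s) % p)).toNat = (((((k : Int) - s) % p)).toNat - 1) + 1 by omega,
            List.drop_succ_cons, Nat.add_sub_cancel]
      rw [hdrop, show (((k : Int) - s) % p - 1).toNat = ((((k : Int) - s) % p)).toNat - 1 by omega]

-- B's distributing fold, bucket by bucket
theorem foldB (p : Int) (hp : 0 < p) :
    ∀ (l : List Int) (s : Int) (days : List (List Int)), days.length = p.toNat →
      (PySem.List.enumerate l s).foldl
          (fun ds q => ds.modify (PySem.Int.mod q.1 p).toNat (· ++ [q.2])) days
        = (List.range p.toNat).map (fun k => days.getD k [] ++ sieve l s p k) := by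
  intro l
  induction l with
  | nil =>
    intro s days hd
    rw [PySem.List.enumerate_nil, List.foldl_nil]
    simp only [sieve_nil, List.append_nil]
    apply List.ext_getElem
    · simp [hd]
    · intro i h1 h2
      simp only [List.getElem_map, List.getElem_range]
      rw [List.getD_eq_getElem _ _ h1]
  | cons x xs ih =>
    intro s days hd
    rw [PySem.List.enumerate_cons, List.foldl_cons]
    rw [ih (s + 1) _ (by rw [List.length_modify]; exact hd)]
    apply List.map_congr_left
    intro k hk
    simp only [List.mem_range] at hk
    rw [sieve_cons]
    have hmlt : (PySem.Int.mod s p).toNat < p.toNat := by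
      have h1 : 0 ≤ PySem.Int.mod s p := by
        rw [PySem.Int.mod_eq_emod_of_pos hp]; exact Int.emod_nonneg _ (ne_of_gt hp)
      have h2 : PySem.Int.mod s p < p := by
        rw [PySem.Int.mod_eq_emod_of_pos hp]; exact Int.emod_lt_of_pos _ hp
      omega
    have hget : (days.modify (PySem.Int.mod s p).toNat (· ++ [x])).getD k []
        = if (PySem.Int.mod s p).toNat = k then days.getD k [] ++ [x] else days.getD k [] := by
      rw [List.getD_eq_getElem?_getD, List.getElem?_modify, List.getD_eq_getElem?_getD]
      by_cases hkm : (PySem.Int.mod s p).toNat = k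
      · rw [if_pos hkm]
        have hkd : k < days.length := by omega
        rw [List.getElem?_eq_getElem hkd]
        simp [hkm]
      · rw [if_neg hkm]
        cases h : days[k]? <;> simp [hkm]
    rw [hget]
    by_cases hkm : (PySem.Int.mod s p).toNat = k
    · rw [if_pos hkm, if_pos hkm, List.append_assoc]
    · rw [if_neg hkm, if_neg hkm, List.nil_append]

-- A's outer for loop is a map over range(period)
theorem foldA (f : Int → List Int) :
    ∀ (l : List Int) (acc : List (List Int)),
      l.foldl (fun days i => days ++ [f i]) acc = acc ++ l.map f := by
  intro l
  induction l with
  | nil => simp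
  | cons x xs ih => intro acc; simp [List.foldl_cons, ih]

-- ===== VERDICT (by name: the statement is the Claim_ definition above) =====
theorem get_seasonal_components_spec : Claim_equal_get_seasonal_components := by
  intro data period _
  unfold Spec_get_seasonal_components get_seasonal_components get_seasonal_components_alt
  by_cases hp : period ≤ 0
  · simp [hp, PySem.List.pyRange_one_eq_nil hp]
  · rw [not_le] at hp
    simp only [if_neg (not_le.mpr hp)]
    rw [foldA, foldB period hp data 0 _ (by simp), PySem.List.pyRange_one]
    simp only [List.nil_append, List.map_map, Function.comp_def, zero_add, sub_zero]
    apply List.map_congr_left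
    intro k hk
    simp only [List.mem_range] at hk
    have hk' : (k : Int) < period := by
      have := Int.toNat_of_nonneg (le_of_lt hp); omega
    rw [aWhile_eq_everyNth data period hp _ _ (by positivity) (by push_cast; omega),
        sieve_eq_everyNth period hp data 0 k hk']
    simp [PySem.Int.mod_eq_emod_of_pos hp, Int.emod_eq_of_lt (by positivity) hk']
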